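-- pv_equiv track=rewrite | github.com/roctbb/ai-game-engine | games/capture_flag/engine.py | _placements
-- ===== SOURCE A (Python) =====
-- def _placements(active_slots: list[str], role_team: dict[str, str], slot_scores: dict[str, int]) -> dict[str, int]:
--     ordered = sorted(active_slots, key=lambda slot: slot_scores[slot], reverse=True)
--     result: dict[str, int] = {}
--     last_score: int | None = None
--     last_place = 0
--     for index, slot in enumerate(ordered, start=1):
--         score = slot_scores[slot]
--         if score != last_score:
--             last_place = index
--             last_score = score
--         result[role_team[slot]] = last_place
--     return result
-- ===== SOURCE B (Python) =====
-- def _placements(active_slots: list[str], role_team: dict[str, str], slot_scores: dict[str, int]) -> dict[str, int]: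
--     groups: dict[int, list[str]] = {}
--     for slot in active_slots:
--         groups.setdefault(slot_scores[slot], []).append(slot)
--     result: dict[str, int] = {}
--     processed = 0
--     for score in sorted(groups, reverse=True):
--         place = processed + 1
--         for slot in groups[score]:
--             result[role_team[slot]] = place
--         processed += len(groups[score])
--     return result
-- ===== Notes on version B (the rewrite author's own statement) =====
-- stated objective: alternative
-- what changed: Replaces the stable full-list sort with per-element last_score/last_place tracking by a score->slots grouping dict: only the distinct scores are sorted (descending) and each group gets place = processed+1 in one block, with a running processed counter.
import Mathlib
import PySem

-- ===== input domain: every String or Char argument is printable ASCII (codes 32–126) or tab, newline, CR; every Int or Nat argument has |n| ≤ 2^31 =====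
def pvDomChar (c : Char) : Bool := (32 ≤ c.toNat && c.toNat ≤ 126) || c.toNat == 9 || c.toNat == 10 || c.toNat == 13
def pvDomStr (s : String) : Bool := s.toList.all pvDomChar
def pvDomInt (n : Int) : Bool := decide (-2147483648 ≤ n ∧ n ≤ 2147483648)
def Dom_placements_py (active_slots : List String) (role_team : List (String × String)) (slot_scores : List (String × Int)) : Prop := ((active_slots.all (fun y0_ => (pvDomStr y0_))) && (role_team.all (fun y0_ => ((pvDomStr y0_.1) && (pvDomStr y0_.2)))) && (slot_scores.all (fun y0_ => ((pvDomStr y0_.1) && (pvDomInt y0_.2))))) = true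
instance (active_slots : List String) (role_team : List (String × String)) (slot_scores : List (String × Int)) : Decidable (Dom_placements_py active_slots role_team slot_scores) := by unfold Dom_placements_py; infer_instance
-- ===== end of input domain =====

-- B replaces the stable sort of all slots + per-element last_score/last_place tracking by a
-- score→slots grouping dict whose distinct scores are sorted descending, assigning each group
-- place = processed+1 as a block (alternative decomposition, same result).

-- ===== PORT A =====
def placements_py (active_slots : List String) (role_team : List (String × String)) (slot_scores : List (String × Int)) : List (String × Int) :=
  let ss := PySem.Dict.ofList slot_scores
  let rt := PySem.Dict.ofList role_team
  let ordered := PySem.List.sorted active_slots (fun slot => ss.getD slot 0) true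
  (ordered.foldl
    (fun (st : PySem.Dict String Int × Option Int × Int × Int) slot =>
      let score := ss.getD slot 0
      let lsp : Int × Option Int :=
        if some score ≠ st.2.1 then (st.2.2.2, some score) else (st.2.2.1, st.2.1)
      (st.1.insert (rt.getD slot "") lsp.1, lsp.2, lsp.1, st.2.2.2 + 1))
    (PySem.Dict.empty, none, 0, 1)).1.items

-- ===== PORT B =====
def placements_py_alt (active_slots : List String) (role_team : List (String × String)) (slot_scores : List (String × Int)) : List (String × Int) :=
  let ss := PySem.Dict.ofList slot_scores
  let rt := PySem.Dict.ofList role_team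
  -- groups.setdefault(slot_scores[slot], []).append(slot)
  let groups := active_slots.foldl
    (fun (g : PySem.Dict Int (List String)) slot => g.modify (ss.getD slot 0) [] (fun l => l ++ [slot]))
    PySem.Dict.empty
  ((PySem.List.sorted groups.keys (fun s => s) true).foldl
    (fun (st : PySem.Dict String Int × Int) score =>
      let grp := groups.getD score []
      let place := st.2 + 1
      (grp.foldl (fun r slot => r.insert (rt.getD slot "") place) st.1, st.2 + (grp.length : Int)))
    (PySem.Dict.empty, 0)).1.items

-- ===== PRECONDITION & SPEC =====
-- Pre_ excludes exactly the inputs on which the Python A raises KeyError: an active slot missing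
-- from slot_scores or from role_team (B raises the same KeyError there).
def Pre_placements_py (active_slots : List String) (role_team : List (String × String)) (slot_scores : List (String × Int)) : Prop :=
  (active_slots.all (fun s => (slot_scores.map Prod.fst).contains s && (role_team.map Prod.fst).contains s)) = true
instance (active_slots : List String) (role_team : List (String × String)) (slot_scores : List (String × Int)) : Decidable (Pre_placements_py active_slots role_team slot_scores) := by unfold Pre_placements_py; infer_instance

def pvWitness_placements_py : List String × (List (String × String)) × (List (String × Int)) :=
  (["a", "b"], [("a", "T1"), ("b", "T2")], [("a", 3), ("b", 1)])

def Spec_placements_py (active_slots : List String) (role_team : List (String × String)) (slot_scores : List (String × Int)) (out : List (String × Int)) : Prop := out = placements_py_alt active_slots role_team slot_scores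
instance (active_slots : List String) (role_team : List (String × String)) (slot_scores : List (String × Int)) (out : List (String × Int)) : Decidable (Spec_placements_py active_slots role_team slot_scores out) := by unfold Spec_placements_py; infer_instance

-- ===== CLAIM (what is proved, stated in full; the proofs are below) =====
def Claim_equal_placements_py : Prop := ∀ (active_slots : List String) (role_team : List (String × String)) (slot_scores : List (String × Int)), Dom_placements_py active_slots role_team slot_scores → Pre_placements_py active_slots role_team slot_scores → Spec_placements_py active_slots role_team slot_scores (placements_py active_slots role_team slot_scores)

-- ===== LEMMAS AND PROOFS =====

-- A's fold step / B's fold step, abstracted over the key and team lookup functions.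
def aStep (k : String → Int) (team : String → String)
    (st : PySem.Dict String Int × Option Int × Int × Int) (slot : String) :
    PySem.Dict String Int × Option Int × Int × Int :=
  let score := k slot
  let lsp : Int × Option Int :=
    if some score ≠ st.2.1 then (st.2.2.2, some score) else (st.2.2.1, st.2.1)
  (st.1.insert (team slot) lsp.1, lsp.2, lsp.1, st.2.2.2 + 1)

def bStep (team : String → String) (f : Int → List String)
    (st : PySem.Dict String Int × Int) (score : Int) : PySem.Dict String Int × Int :=
  ((f score).foldl (fun r slot => r.insert (team slot) (st.2 + 1)) st.1, st.2 + ((f score).length : Int))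

lemma insertBy_cons_pos {α : Type} {before : α → α → Bool} {x y : α} {ys : List α}
    (h : before x y = true) : PySem.List.insertBy before x (y :: ys) = x :: y :: ys := by
  simp [PySem.List.insertBy, h]

lemma insertBy_cons_neg {α : Type} {before : α → α → Bool} {x y : α} {ys : List α}
    (h : before x y = false) : PySem.List.insertBy before x (y :: ys) = y :: PySem.List.insertBy before x ys := by
  simp [PySem.List.insertBy, h]

lemma insertBy_append_not {α : Type} (before : α → α → Bool) (x : α) (l r : List α)
    (h : ∀ y ∈ l, before x y = false) :
    PySem.List.insertBy before x (l ++ r) = l ++ PySem.List.insertBy before x r := by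
  induction l with
  | nil => rfl
  | cons y l ih =>
      have hy := h y (List.mem_cons_self ..)
      simp only [List.cons_append, insertBy_cons_neg hy]
      rw [ih (fun z hz => h z (List.mem_cons_of_mem _ hz))]

lemma insertBy_all_before {α : Type} (before : α → α → Bool) (x : α) (m : List α)
    (h : ∀ y ∈ m, before x y = true) :
    PySem.List.insertBy before x m = x :: m := by
  cases m with
  | nil => rfl
  | cons y ys => exact insertBy_cons_pos (h y (List.mem_cons_self ..))

lemma flatMap_congr_mem {α β : Type} (S : List α) (f g : α → List β)
    (h : ∀ s ∈ S, f s = g s) : S.flatMap f = S.flatMap g := by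
  induction S with
  | nil => rfl
  | cons s S ih =>
      simp only [List.flatMap_cons, h s (List.mem_cons_self ..)]
      rw [ih (fun t ht => h t (List.mem_cons_of_mem _ ht))]

lemma insertBy_flatMap_mem (k : String → Int) (S : List Int) (f : Int → List String) (x : String)
    (hS : S.Pairwise (fun a b => b < a))
    (hf : ∀ s ∈ S, ∀ y ∈ f s, k y = s)
    (hne : ∀ s ∈ S, f s ≠ [])
    (hmem : k x ∈ S) :
    PySem.List.insertBy (fun a b => decide (k b < k a)) x (S.flatMap f) =
      S.flatMap (fun s => if s = k x then f s ++ [x] else f s) := by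
  induction S with
  | nil => cases hmem
  | cons s1 S' ih =>
      have hlt : ∀ t ∈ S', t < s1 := (List.pairwise_cons.mp hS).1
      have hS' := (List.pairwise_cons.mp hS).2
      have hf' : ∀ s ∈ S', ∀ y ∈ f s, k y = s := fun s hs => hf s (List.mem_cons_of_mem _ hs)
      have hne' : ∀ s ∈ S', f s ≠ [] := fun s hs => hne s (List.mem_cons_of_mem _ hs)
      by_cases hxs : k x = s1
      · have h1 : ∀ y ∈ f s1, (fun a b => decide (k b < k a)) x y = false := by
          intro y hy
          have := hf s1 (List.mem_cons_self ..) y hy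
          simp [this, hxs]
        have h2 : PySem.List.insertBy (fun a b => decide (k b < k a)) x (S'.flatMap f)
            = x :: S'.flatMap f := by
          apply insertBy_all_before
          intro y hy
          obtain ⟨t, ht, hy2⟩ := List.mem_flatMap.mp hy
          have hk := hf' t ht y hy2
          have := hlt t ht
          simp [hk, hxs]; omega
        rw [List.flatMap_cons, insertBy_append_not _ _ _ _ h1, h2, List.flatMap_cons]
        rw [if_pos hxs.symm]
        rw [flatMap_congr_mem S' (fun s => if s = k x then f s ++ [x] else f s) f
          (by intro t ht; have := hlt t ht
              show (if t = k x then f t ++ [x] else f t) = f t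
              rw [if_neg]; omega)]
        simp
      · have hmem' : k x ∈ S' := by
          rcases List.mem_cons.mp hmem with h | h
          · exact absurd h hxs
          · exact h
        have hlt1 : k x < s1 := hlt _ hmem'
        have h1 : ∀ y ∈ f s1, (fun a b => decide (k b < k a)) x y = false := by
          intro y hy
          have := hf s1 (List.mem_cons_self ..) y hy
          simp [this]; omega
        rw [List.flatMap_cons, insertBy_append_not _ _ _ _ h1,
          ih hS' hf' hne' hmem', List.flatMap_cons, if_neg (by omega)]

lemma insertBy_flatMap_not_mem (k : String → Int) (S : List Int) (f : Int → List String) (x : String)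
    (hS : S.Pairwise (fun a b => b < a))
    (hf : ∀ s ∈ S, ∀ y ∈ f s, k y = s)
    (hmem : k x ∉ S) :
    PySem.List.insertBy (fun a b => decide (k b < k a)) x (S.flatMap f) =
      (PySem.List.insertBy (fun (a b : Int) => decide (b < a)) (k x) S).flatMap
        (fun s => if s = k x then [x] else f s) := by
  induction S with
  | nil => simp [PySem.List.insertBy]
  | cons s1 S' ih =>
      have hlt : ∀ t ∈ S', t < s1 := (List.pairwise_cons.mp hS).1
      have hS' := (List.pairwise_cons.mp hS).2
      have hf' : ∀ s ∈ S', ∀ y ∈ f s, k y = s := fun s hs => hf s (List.mem_cons_of_mem _ hs)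
      have hxs : k x ≠ s1 := fun h => hmem (h ▸ List.mem_cons_self ..)
      have hmem' : k x ∉ S' := fun h => hmem (List.mem_cons_of_mem _ h)
      rcases lt_or_gt_of_ne hxs with hlt1 | hgt1
      · -- k x < s1 : skip the first block
        have h1 : ∀ y ∈ f s1, (fun a b => decide (k b < k a)) x y = false := by
          intro y hy
          have := hf s1 (List.mem_cons_self ..) y hy
          simp [this]; omega
        rw [List.flatMap_cons, insertBy_append_not _ _ _ _ h1, ih hS' hf' hmem',
          insertBy_cons_neg (by simp; omega), List.flatMap_cons, if_neg (Ne.symm hxs)]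
      · -- s1 < k x : x becomes the new first block
        have h2 : PySem.List.insertBy (fun a b => decide (k b < k a)) x ((s1 :: S').flatMap f)
            = x :: (s1 :: S').flatMap f := by
          apply insertBy_all_before
          intro y hy
          obtain ⟨t, ht, hy2⟩ := List.mem_flatMap.mp hy
          have hk := hf t ht y hy2
          have : t ≤ s1 := by
            rcases List.mem_cons.mp ht with h | h
            · omega
            · have := hlt t h; omega
          simp [hk]; omega
        rw [h2, insertBy_cons_pos (by simp; omega)]
        simp only [List.flatMap_cons]
        rw [if_pos trivial, if_neg (Ne.symm hxs)]
        rw [flatMap_congr_mem S' (fun s => if s = k x then [x] else f s) f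
          (by intro t ht; have := hlt t ht
              show (if t = k x then [x] else f t) = f t
              rw [if_neg]; omega)]
        simp

-- stable descending sort = flatten of descending distinct-score groups
lemma stable_flatten (k : String → Int) (xs : List String) :
    PySem.List.sorted xs k true =
      (PySem.List.sorted (PySem.List.dedup (xs.map k)) (fun s => s) true).flatMap
        (fun s => xs.filter (fun y => decide (k y = s))) := by
  induction xs using List.reverseRecOn with
  | nil => rfl
  | append_singleton xs x ih =>
      have hdd : PySem.List.dedup ((xs ++ [x]).map k) =
          PySem.Set.add (PySem.List.dedup (xs.map k)) (k x) := by
        simp only [List.map_append, List.map_cons, List.map_nil, PySem.List.dedup,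
          PySem.Set.ofList_eq_foldl, List.foldl_append, List.foldl_cons, List.foldl_nil]
      have hsort : PySem.List.sorted (xs ++ [x]) k true =
          PySem.List.insertBy (fun a b => decide (k b < k a)) x (PySem.List.sorted xs k true) := by
        rw [PySem.List.sorted_rev_eq_foldl_insertBy, PySem.List.sorted_rev_eq_foldl_insertBy,
          List.foldl_append, List.foldl_cons, List.foldl_nil]
      set D := PySem.List.dedup (xs.map k) with hD
      set S := PySem.List.sorted D (fun s => s) true with hS
      have hpermD : S.Perm D := PySem.List.sorted_perm D (fun s => s) true
      have hSd : S.Pairwise (fun a b : Int => b < a) := by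
        have hp := PySem.List.sorted_pairwise_rev D (fun s => s)
        have hnd : S.Nodup := (hpermD.nodup_iff).mpr (PySem.List.nodup_dedup _)
        exact (hp.and hnd).imp (fun {a b} h => lt_of_le_of_ne h.1 (Ne.symm h.2))
      have hmemS : ∀ s, s ∈ S ↔ s ∈ xs.map k := by
        intro s
        rw [hpermD.mem_iff, hD, PySem.List.mem_dedup]
      have hf : ∀ s ∈ S, ∀ y ∈ xs.filter (fun y => decide (k y = s)), k y = s := by
        intro s _ y hy
        exact of_decide_eq_true (List.mem_filter.mp hy).2
      have hne : ∀ s ∈ S, xs.filter (fun y => decide (k y = s)) ≠ [] := by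
        intro s hs
        obtain ⟨y, hy, hky⟩ := List.mem_map.mp ((hmemS s).mp hs)
        intro hnil
        have : y ∈ xs.filter (fun y => decide (k y = s)) :=
          List.mem_filter.mpr ⟨hy, decide_eq_true hky⟩
        rw [hnil] at this; cases this
      by_cases hmem : k x ∈ xs.map k
      · -- score already present: block for k x gains x at its end
        have hD' : PySem.List.dedup ((xs ++ [x]).map k) = D := by
          rw [hdd]
          have : k x ∈ D := (PySem.List.mem_dedup _ _).mpr hmem
          simp [PySem.Set.add, this]
        rw [hsort, ih, insertBy_flatMap_mem k S _ x hSd hf hne ((hmemS _).mpr hmem), hD', ← hS]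
        apply flatMap_congr_mem
        intro s _
        by_cases hsx : s = k x
        · simp [hsx, List.filter_append]
        · simp only [List.filter_append, if_neg hsx, List.filter_cons, List.filter_nil]
          rw [if_neg (by simpa using fun h => hsx (by omega))]
          simp
      · -- new score: a new singleton block appears at its sorted position
        have hD' : PySem.List.dedup ((xs ++ [x]).map k) = D ++ [k x] := by
          rw [hdd]
          have : k x ∉ D := fun h => hmem ((PySem.List.mem_dedup _ _).mp h)
          simp [PySem.Set.add, this]
        have hS' : PySem.List.sorted (D ++ [k x]) (fun s => s) true =
            PySem.List.insertBy (fun a b : Int => decide (b < a)) (k x) S := by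
          rw [hS, PySem.List.sorted_rev_eq_foldl_insertBy, PySem.List.sorted_rev_eq_foldl_insertBy,
            List.foldl_append, List.foldl_cons, List.foldl_nil]
        have hxnil : xs.filter (fun y => decide (k y = k x)) = [] := by
          rw [List.filter_eq_nil_iff]
          intro y hy
          simp only [decide_eq_true_eq]
          intro hk
          exact hmem (hk ▸ List.mem_map_of_mem hy)
        rw [hsort, ih, insertBy_flatMap_not_mem k S _ x hSd hf
          (fun h => hmem ((hmemS _).mp h)), hD', hS']
        apply flatMap_congr_mem
        intro s _
        by_cases hsx : s = k x
        · simp [hsx, List.filter_append, hxnil]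
        · simp only [List.filter_append, if_neg hsx, List.filter_cons, List.filter_nil]
          rw [if_neg (by simpa using fun h => hsx (by omega))]
          simp

lemma getD_groups (k : String → Int) (xs : List String) (g : PySem.Dict Int (List String)) (s : Int) :
    (xs.foldl (fun g slot => g.modify (k slot) [] (fun l => l ++ [slot])) g).getD s [] =
      g.getD s [] ++ xs.filter (fun y => decide (k y = s)) := by
  induction xs generalizing g with
  | nil => simp
  | cons x xs ih =>
      rw [List.foldl_cons, ih]
      simp only [PySem.Dict.modify, PySem.Dict.getD_insert, List.filter_cons]
      by_cases hsx : s = k x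
      · rw [if_pos hsx, if_pos (by simp [hsx]), hsx]
        simp
      · rw [if_neg hsx, if_neg (by simpa using fun h => hsx (by omega))]

lemma keys_groups (k : String → Int) (xs : List String) :
    (xs.foldl (fun (g : PySem.Dict Int (List String)) slot => g.modify (k slot) [] (fun l => l ++ [slot])) PySem.Dict.empty).keys =
      PySem.List.dedup (xs.map k) := by
  rw [PySem.Dict.keys_foldl_modify_key xs k [] (fun _ slot => (fun l => l ++ [slot]))]
  rw [PySem.List.dedup_eq_ofList]
  rfl

lemma group_run (k : String → Int) (team : String → String) (s : Int) (g : List String)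
    (hall : ∀ y ∈ g, k y = s) :
    ∀ (res : PySem.Dict String Int) (p j : Int),
      g.foldl (aStep k team) (res, some s, p, j) =
        (g.foldl (fun r y => r.insert (team y) p) res, some s, p, j + (g.length : Int)) := by
  induction g with
  | nil => intro res p j; simp
  | cons y g ih =>
      intro res p j
      have hy := hall y (List.mem_cons_self ..)
      rw [List.foldl_cons]
      have hstep : aStep k team (res, some s, p, j) y = (res.insert (team y) p, some s, p, j + 1) := by
        simp [aStep, hy]
      rw [hstep, ih (fun z hz => hall z (List.mem_cons_of_mem _ hz))]
      refine congrArg _ ?_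
      refine congrArg _ ?_
      refine congrArg _ ?_
      simp [Int.add_comm, Int.add_left_comm]

lemma group_head_run (k : String → Int) (team : String → String) (s : Int) (g : List String)
    (hall : ∀ y ∈ g, k y = s) (hne : g ≠ [])
    (res : PySem.Dict String Int) (last : Option Int) (lp j : Int) (hlast : last ≠ some s) :
    g.foldl (aStep k team) (res, last, lp, j) =
      (g.foldl (fun r y => r.insert (team y) j) res, some s, j, j + (g.length : Int)) := by
  cases g with
  | nil => exact absurd rfl hne
  | cons y g =>
      have hy := hall y (List.mem_cons_self ..)
      rw [List.foldl_cons]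
      have hstep : aStep k team (res, last, lp, j) y = (res.insert (team y) j, some s, j, j + 1) := by
        simp only [aStep, hy]
        rw [if_pos (by simp; exact fun h => hlast h.symm)]
      rw [hstep, group_run k team s g (fun z hz => hall z (List.mem_cons_of_mem _ hz))]
      rw [List.foldl_cons]
      refine congrArg _ ?_
      refine congrArg _ ?_
      refine congrArg _ ?_
      simp [Int.add_comm, Int.add_left_comm]

lemma main_run (k : String → Int) (team : String → String) :
    ∀ (S : List Int) (f : Int → List String) (res : PySem.Dict String Int)
      (processed lp : Int) (last : Option Int),
      S.Pairwise (fun a b => b < a) →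
      (∀ s ∈ S, ∀ y ∈ f s, k y = s) →
      (∀ s ∈ S, f s ≠ []) →
      (∀ s ∈ S, last ≠ some s) →
      ((S.flatMap f).foldl (aStep k team) (res, last, lp, processed + 1)).1 =
        (S.foldl (bStep team f) (res, processed)).1 := by
  intro S
  induction S with
  | nil => intro f res processed lp last _ _ _ _; rfl
  | cons s1 S' ih =>
      intro f res processed lp last hS hf hne hlast
      have hlt : ∀ t ∈ S', t < s1 := (List.pairwise_cons.mp hS).1
      rw [List.flatMap_cons, List.foldl_append]
      rw [group_head_run k team s1 (f s1) (hf s1 (List.mem_cons_self ..))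
        (hne s1 (List.mem_cons_self ..)) res last lp (processed + 1)
        (hlast s1 (List.mem_cons_self ..))]
      have harith : processed + 1 + ((f s1).length : Int) = (processed + ((f s1).length : Int)) + 1 := by ring
      rw [harith]
      rw [ih f _ (processed + ((f s1).length : Int)) (processed + 1) (some s1)
        (List.pairwise_cons.mp hS).2
        (fun t ht => hf t (List.mem_cons_of_mem _ ht))
        (fun t ht => hne t (List.mem_cons_of_mem _ ht))
        (fun t ht h => by have := hlt t ht; cases h; omega)]
      rfl

-- ===== VERDICT (by name: the statement is the Claim_ definition above) =====
theorem placements_py_spec : Claim_equal_placements_py := by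
  intro active role ss _ _
  unfold Spec_placements_py
  have hgetD : ∀ sc : Int,
      (active.foldl (fun (g : PySem.Dict Int (List String)) slot =>
        g.modify ((PySem.Dict.ofList ss).getD slot 0) [] (fun l => l ++ [slot]))
        PySem.Dict.empty).getD sc []
      = active.filter (fun y => decide ((PySem.Dict.ofList ss).getD y 0 = sc)) := by
    intro sc
    rw [getD_groups (fun slot => (PySem.Dict.ofList ss).getD slot 0) active PySem.Dict.empty sc]
    rfl
  have hkeys := keys_groups (fun slot => (PySem.Dict.ofList ss).getD slot 0) active
  set k : String → Int := fun slot => (PySem.Dict.ofList ss).getD slot 0 with hk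
  set team : String → String := fun slot => (PySem.Dict.ofList role).getD slot "" with hteam
  set D := PySem.List.dedup (active.map k) with hD
  set S := PySem.List.sorted D (fun s => s) true with hS
  -- facts about S (as in stable_flatten)
  have hpermD : S.Perm D := PySem.List.sorted_perm D (fun s => s) true
  have hSd : S.Pairwise (fun a b : Int => b < a) := by
    have hp := PySem.List.sorted_pairwise_rev D (fun s => s)
    have hnd : S.Nodup := (hpermD.nodup_iff).mpr (PySem.List.nodup_dedup _)
    exact (hp.and hnd).imp (fun {a b} h => lt_of_le_of_ne h.1 (Ne.symm h.2))
  have hmemS : ∀ t, t ∈ S ↔ t ∈ active.map k := by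
    intro t
    rw [hpermD.mem_iff, hD, PySem.List.mem_dedup]
  have hf : ∀ t ∈ S, ∀ y ∈ active.filter (fun y => decide (k y = t)), k y = t := by
    intro t _ y hy
    exact of_decide_eq_true (List.mem_filter.mp hy).2
  have hne : ∀ t ∈ S, active.filter (fun y => decide (k y = t)) ≠ [] := by
    intro t ht
    obtain ⟨y, hy, hky⟩ := List.mem_map.mp ((hmemS t).mp ht)
    intro hnil
    have : y ∈ active.filter (fun y => decide (k y = t)) :=
      List.mem_filter.mpr ⟨hy, decide_eq_true hky⟩
    rw [hnil] at this; cases this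
  show placements_py active role ss = placements_py_alt active role ss
  have hB : placements_py_alt active role ss =
      (S.foldl (bStep team (fun t => active.filter (fun y => decide (k y = t)))) (PySem.Dict.empty, 0)).1.items := by
    show ((PySem.List.sorted
        (active.foldl (fun (g : PySem.Dict Int (List String)) slot =>
          g.modify (k slot) [] (fun l => l ++ [slot])) PySem.Dict.empty).keys (fun s => s) true).foldl
        (bStep team (fun t =>
          (active.foldl (fun (g : PySem.Dict Int (List String)) slot =>
            g.modify (k slot) [] (fun l => l ++ [slot])) PySem.Dict.empty).getD t []))
        (PySem.Dict.empty, 0)).1.items = _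
    rw [hkeys, funext hgetD]
  have hA : placements_py active role ss =
      ((S.flatMap (fun t => active.filter (fun y => decide (k y = t)))).foldl (aStep k team)
        (PySem.Dict.empty, none, 0, (0 : Int) + 1)).1.items := by
    show ((PySem.List.sorted active k true).foldl (aStep k team)
        (PySem.Dict.empty, none, 0, 1)).1.items = _
    rw [stable_flatten k active]
    rfl
  rw [hA, hB]
  exact congrArg PySem.Dict.items
    (main_run k team S (fun t => active.filter (fun y => decide (k y = t)))
      PySem.Dict.empty 0 0 none hSd hf hne (fun t _ h => by cases h))
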